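-- pv_equiv track=rewrite | github.com/redhat-ai-americas/legal-document-analysis-demo | utils/page_anchors.py | _add_heuristic_anchors
-- ===== SOURCE A (Python) =====
-- def _add_heuristic_anchors(content: str) -> str:
--     """
--     Add page anchors using heuristics
--
--     Args:
--         content: Document content
--
--     Returns:
--         Content with page anchors
--     """
--     # Simple heuristic: add page anchor every ~50 lines
--     lines = content.split('\n')
--     result_lines = []
--     page = 1
--
--     for i, line in enumerate(lines):
--         if i % 50 == 0 and i > 0:
--             result_lines.append(f"[[page={page}]]")
--             page += 1
--         result_lines.append(line)
--
--     # Add initial page anchor if not present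
--     if result_lines and not result_lines[0].startswith('[[page='):
--         result_lines.insert(0, '[[page=1]]')
--
--     return '\n'.join(result_lines)
-- ===== SOURCE B (Python) =====
-- def _add_heuristic_anchors(content: str) -> str:
--     lines = content.split('\n')
--     result = []
--     for start in range(0, len(lines), 50):
--         if start:
--             result.append(f"[[page={start // 50}]]")
--         result.extend(lines[start:start + 50])
--     if result and not result[0].startswith('[[page='):
--         result.insert(0, '[[page=1]]')
--     return '\n'.join(result)
-- ===== Notes on version B (the rewrite author's own statement) =====
-- stated objective: simpler
-- what changed: Replaces the per-line pass with an index-modulo test and a running page counter by a chunk-shaped pass over range(0, len(lines), 50) that extends the result with whole 50-line slices and computes each anchor number directly as start // 50.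
import Mathlib
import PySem

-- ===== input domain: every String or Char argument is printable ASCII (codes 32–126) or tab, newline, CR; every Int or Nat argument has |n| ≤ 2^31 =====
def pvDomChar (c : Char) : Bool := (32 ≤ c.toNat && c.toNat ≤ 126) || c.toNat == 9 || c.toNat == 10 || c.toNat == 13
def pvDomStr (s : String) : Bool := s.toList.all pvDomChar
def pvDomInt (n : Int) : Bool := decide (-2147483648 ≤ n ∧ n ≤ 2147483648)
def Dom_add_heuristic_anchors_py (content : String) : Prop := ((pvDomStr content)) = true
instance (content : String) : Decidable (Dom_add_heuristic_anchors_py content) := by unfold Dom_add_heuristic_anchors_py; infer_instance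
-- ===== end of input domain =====

-- B replaces A's per-line index-modulo pass (running page counter) by a chunk pass over
-- range(0, len(lines), 50) with the anchor number computed as start // 50 (objective: simpler).

-- ===== PORT A =====
-- the for-loop over enumerate(lines) with state (result_lines, page)
def pvALoop (l : List (Int × String)) (res : List String) (page : Int) : List String :=
  match l with
  | [] => res
  | (i, line) :: rest =>
      if PySem.Int.mod i 50 = 0 ∧ i > 0 then
        pvALoop rest ((res ++ ["[[page=" ++ PySem.Int.toStr page ++ "]]"]) ++ [line]) (page + 1)
      else
        pvALoop rest (res ++ [line]) page

def add_heuristic_anchors_py (content : String) : String :=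
  let lines := (PySem.Str.split? content "\n").getD []   -- sep "\n" ≠ "", so split? is always `some`
  let result := pvALoop (PySem.List.enumerate lines) [] 1
  let result :=
    if result ≠ [] ∧ PySem.Str.startswith (result.headD "") "[[page=" = false then
      PySem.List.insert result 0 "[[page=1]]"
    else result
  PySem.Str.join "\n" result

-- ===== PORT B =====
-- the for-loop over range(0, len(lines), 50) appending an anchor (except at start 0) then a 50-line slice
def pvBLoop (lines : List String) : List String :=
  (PySem.List.pyRange 0 (PySem.List.len lines) 50).foldl
    (fun res start =>
      (if start ≠ 0 then
        res ++ ["[[page=" ++ PySem.Int.toStr (PySem.Int.floordiv start 50) ++ "]]"]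
      else res)
      ++ PySem.List.slice lines (some start) (some (start + 50))) []

def add_heuristic_anchors_py_alt (content : String) : String :=
  let lines := (PySem.Str.split? content "\n").getD []   -- sep "\n" ≠ "", so split? is always `some`
  let result := pvBLoop lines
  let result :=
    if result ≠ [] ∧ PySem.Str.startswith (result.headD "") "[[page=" = false then
      PySem.List.insert result 0 "[[page=1]]"
    else result
  PySem.Str.join "\n" result

-- ===== PRECONDITION & SPEC =====
def Spec_add_heuristic_anchors_py (content : String) (out : String) : Prop := out = add_heuristic_anchors_py_alt content
instance (content : String) (out : String) : Decidable (Spec_add_heuristic_anchors_py content out) := by unfold Spec_add_heuristic_anchors_py; infer_instance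

-- ===== CLAIM (what is proved, stated in full; the proofs are below) =====
def Claim_equal_add_heuristic_anchors_py : Prop := ∀ (content : String), Dom_add_heuristic_anchors_py content → Spec_add_heuristic_anchors_py content (add_heuristic_anchors_py content)

-- ===== LEMMAS AND PROOFS =====

-- canonical chunk form both loops are proved equal to
def pvEmit (ls : List String) (q : Nat) : List String :=
  if h : ls = [] then []
  else
    (if q = 0 then [] else ["[[page=" ++ PySem.Int.toStr (q : Int) ++ "]]"])
      ++ ls.take 50 ++ pvEmit (ls.drop 50) (q + 1)
termination_by ls.length
decreasing_by
  cases ls with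
  | nil => exact absurd rfl h
  | cons x xs => simp only [List.length_drop, List.length_cons]; omega

theorem pvALoop_pre (l : List (Int × String)) (res1 res2 : List String) (page : Int) :
    pvALoop l (res1 ++ res2) page = res1 ++ pvALoop l res2 page := by
  induction l generalizing res2 page with
  | nil => simp [pvALoop]
  | cons p rest ih =>
      obtain ⟨i, line⟩ := p
      rw [pvALoop, pvALoop]
      split_ifs with h
      · rw [show ((res1 ++ res2) ++ ["[[page=" ++ PySem.Int.toStr page ++ "]]"]) ++ [line]
              = res1 ++ ((res2 ++ ["[[page=" ++ PySem.Int.toStr page ++ "]]"]) ++ [line]) by simp, ih]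
      · rw [show (res1 ++ res2) ++ [line] = res1 ++ (res2 ++ [line]) by simp, ih]

theorem pvALoop_acc (l : List (Int × String)) (res : List String) (page : Int) :
    pvALoop l res page = res ++ pvALoop l [] page := by
  simpa using pvALoop_pre l res [] page

-- mid-chunk: from index 50*q+k (1 ≤ k ≤ 50) no anchor fires until the next multiple of 50
theorem pvALoop_mid (m : Nat) : ∀ (ls : List String) (q k : Nat) (page : Int),
    m = 50 - k → 1 ≤ k → k ≤ 50 →
    pvALoop (PySem.List.enumerate ls ((50 * q + k : Nat) : Int)) [] page
      = ls.take (50 - k) ++ pvALoop (PySem.List.enumerate (ls.drop (50 - k)) ((50 * (q + 1) : Nat) : Int)) [] page := by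
  induction m with
  | zero =>
      intro ls q k page hm h1 h50
      have hk : k = 50 := by omega
      subst hk
      have : 50 * q + 50 = 50 * (q + 1) := by ring
      rw [this]
      simp
  | succ n ih =>
      intro ls q k page hm h1 h50
      cases ls with
      | nil => simp [PySem.List.enumerate, pvALoop]
      | cons x xs =>
          rw [PySem.List.enumerate_cons]
          have hk49 : k ≤ 49 := by omega
          have hcond : ¬ (PySem.Int.mod ((50 * q + k : Nat) : Int) 50 = 0 ∧ ((50 * q + k : Nat) : Int) > 0) := by
            intro ⟨hmod, _⟩
            rw [show (50 : Int) = ((50 : Nat) : Int) from rfl, PySem.Int.mod_natCast] at hmod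
            have h0 : (50 * q + k) % 50 = 0 := by exact_mod_cast hmod
            omega
          rw [pvALoop, if_neg hcond, pvALoop_acc]
          have hcast : ((50 * q + k : Nat) : Int) + 1 = ((50 * q + (k + 1) : Nat) : Int) := by push_cast; ring
          rw [hcast, ih xs q (k + 1) page (by omega) (by omega) (by omega)]
          have ht : (x :: xs).take (50 - k) = x :: xs.take (50 - (k + 1)) := by
            rw [show 50 - k = (50 - (k + 1)) + 1 by omega]
            rfl
          have hd : (x :: xs).drop (50 - k) = xs.drop (50 - (k + 1)) := by
            rw [show 50 - k = (50 - (k + 1)) + 1 by omega]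
            rfl
          rw [ht, hd]
          simp

-- chunk heads: the A loop from a chunk boundary equals pvEmit
theorem pvALoop_emit (n : Nat) : ∀ (ls : List String) (q : Nat), ls.length ≤ n →
    pvALoop (PySem.List.enumerate ls ((50 * q : Nat) : Int)) [] ((max q 1 : Nat) : Int)
      = pvEmit ls q := by
  induction n with
  | zero =>
      intro ls q hn
      have : ls = [] := by cases ls <;> simp_all
      subst this
      simp [PySem.List.enumerate, pvALoop, pvEmit]
  | succ n ih =>
      intro ls q hn
      cases ls with
      | nil => simp [PySem.List.enumerate, pvALoop, pvEmit]
      | cons x xs =>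
          simp only [List.length_cons, Nat.add_le_add_iff_right] at hn
          rw [PySem.List.enumerate_cons, pvEmit, dif_neg (by simp : ¬ (x :: xs = []))]
          by_cases hq : q = 0
          · subst hq
            have hcond : ¬ (PySem.Int.mod ((50 * 0 : Nat) : Int) 50 = 0 ∧ ((50 * 0 : Nat) : Int) > 0) := by simp
            rw [pvALoop, if_neg hcond, pvALoop_acc]
            have hcast : ((50 * 0 : Nat) : Int) + 1 = ((50 * 0 + 1 : Nat) : Int) := by omega
            rw [hcast, pvALoop_mid (50 - 1) xs 0 1 _ rfl (by omega) (by omega)]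
            have hemit := ih (xs.drop (50 - 1)) 1 (by simp [List.length_drop]; omega)
            have ht : (x :: xs).take 50 = x :: xs.take 49 := rfl
            have hd : (x :: xs).drop 50 = xs.drop 49 := rfl
            rw [ht, hd]
            norm_num at hemit ⊢
            exact hemit
          · have hq1 : 1 ≤ q := by omega
            have hmax : (max q 1) = q := by omega
            have hcond : (PySem.Int.mod ((50 * q : Nat) : Int) 50 = 0 ∧ ((50 * q : Nat) : Int) > 0) := by
              constructor
              · rw [show (50 : Int) = ((50 : Nat) : Int) from rfl, PySem.Int.mod_natCast]
                simp [Nat.mul_mod_right]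
              · have h1 : 1 ≤ 50 * q := by omega
                exact_mod_cast h1
            rw [pvALoop, if_pos hcond, pvALoop_acc]
            have hcast : ((50 * q : Nat) : Int) + 1 = ((50 * q + 1 : Nat) : Int) := by omega
            rw [hcast, pvALoop_mid (50 - 1) xs q 1 _ rfl (by omega) (by omega)]
            have hemit := ih (xs.drop (50 - 1)) (q + 1) (by simp [List.length_drop]; omega)
            have hmax1 : (max (q + 1) 1) = q + 1 := by omega
            rw [hmax1] at hemit
            have hpg : (((q + 1 : Nat)) : Int) = ((max q 1 : Nat) : Int) + 1 := by omega
            rw [hpg] at hemit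
            have ht : (x :: xs).take 50 = x :: xs.take 49 := rfl
            have hd : (x :: xs).drop 50 = xs.drop 49 := rfl
            rw [ht, hd]
            norm_num at hemit ⊢
            rw [hemit, show (max (q:Int) 1) = (q:Int) by omega, if_neg hq]
            simp

-- range(0, n, 50) unrolls one chunk at a time
theorem pvRange_step_cons (a b : Int) (h : a < b) :
    PySem.List.pyRange a b 50 = a :: PySem.List.pyRange (a + 50) b 50 := by
  rw [PySem.List.pyRange_of_pos a b (by omega : (0:Int) < 50),
      PySem.List.pyRange_of_pos (a + 50) b (by omega : (0:Int) < 50)]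
  have hcnt : ((b - a + 50 - 1) / 50).toNat = (if a + 50 < b then ((b - (a + 50) + 50 - 1) / 50).toNat else 0) + 1 := by
    split_ifs <;> omega
  rw [if_pos h, hcnt, List.range_succ_eq_map, List.map_cons, List.map_map]
  refine List.cons_eq_cons.mpr ⟨by simp, ?_⟩
  refine List.map_congr_left ?_
  intro k _
  simp [Function.comp, Nat.succ_eq_add_one]
  ring

-- the B loop body: one chunk of output
def pvBChunk (lines : List String) (start : Int) : List String :=
  (if start ≠ 0 then ["[[page=" ++ PySem.Int.toStr (PySem.Int.floordiv start 50) ++ "]]"] else [])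
    ++ PySem.List.slice lines (some start) (some (start + 50))

-- the B loop from a chunk boundary equals pvEmit
theorem pvBLoop_emit (m : Nat) : ∀ (lines : List String) (q : Nat), lines.length ≤ 50 * q + m →
    (PySem.List.pyRange ((50 * q : Nat) : Int) (PySem.List.len lines) 50).flatMap (pvBChunk lines)
      = pvEmit (lines.drop (50 * q)) q := by
  induction m with
  | zero =>
      intro lines q hn
      have hle : PySem.List.len lines ≤ ((50 * q : Nat) : Int) := by
        simp [PySem.List.len_eq]
        exact_mod_cast hn
      rw [PySem.List.pyRange_of_pos _ _ (by omega : (0:Int) < 50),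
          if_neg (by omega : ¬ ((50 * q : Nat) : Int) < PySem.List.len lines)]
      rw [List.drop_eq_nil_of_le (by omega : lines.length ≤ 50 * q), pvEmit]
      simp
  | succ m ih =>
      intro lines q hn
      by_cases hlt : 50 * q < lines.length
      · have hltI : ((50 * q : Nat) : Int) < PySem.List.len lines := by
          simp [PySem.List.len_eq]
          exact_mod_cast hlt
        rw [pvRange_step_cons _ _ hltI, List.flatMap_cons]
        have hcast : ((50 * q : Nat) : Int) + 50 = ((50 * (q + 1) : Nat) : Int) := by push_cast; ring
        rw [hcast, ih lines (q + 1) (by omega)]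
        have hchunk : pvBChunk lines ((50 * q : Nat) : Int)
            = (if q = 0 then [] else ["[[page=" ++ PySem.Int.toStr (q : Int) ++ "]]"])
              ++ (lines.drop (50 * q)).take 50 := by
          unfold pvBChunk
          have hslice : PySem.List.slice lines (some ((50 * q : Nat) : Int)) (some (((50 * q : Nat) : Int) + 50))
              = (lines.drop (50 * q)).take 50 := by
            rw [show (((50 * q : Nat) : Int) + 50) = (((50 * q : Nat) : Int) + ((50 : Nat) : Int)) by norm_num]
            exact PySem.List.slice_natCast_add lines (50 * q) 50
          rw [hslice]
          have hdiv : PySem.Int.floordiv ((50 * q : Nat) : Int) 50 = (q : Int) := by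
            rw [show (50 : Int) = ((50 : Nat) : Int) from rfl, PySem.Int.floordiv_natCast]
            norm_num
          rw [hdiv]
          by_cases hq : q = 0
          · subst hq; simp
          · have h50q : ((50 * q : Nat) : Int) ≠ 0 := by
              have : (50 * q : Nat) ≠ 0 := by omega
              exact_mod_cast this
            rw [if_pos h50q, if_neg hq]
        have hd0 : lines.drop (50 * (q + 1)) = (lines.drop (50 * q)).drop 50 := by
          rw [List.drop_drop, show 50 * q + 50 = 50 * (q + 1) by ring]
        rw [hchunk, hd0]
        conv_rhs => rw [pvEmit]
        rw [dif_neg (List.ne_nil_of_length_pos (l := lines.drop (50 * q)) (by simp only [List.length_drop]; omega))]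
      · have hle : PySem.List.len lines ≤ ((50 * q : Nat) : Int) := by
          simp [PySem.List.len_eq]
          exact_mod_cast Nat.le_of_not_lt hlt
        rw [PySem.List.pyRange_of_pos _ _ (by omega : (0:Int) < 50),
            if_neg (by omega : ¬ ((50 * q : Nat) : Int) < PySem.List.len lines)]
        rw [List.drop_eq_nil_of_le (by omega : lines.length ≤ 50 * q), pvEmit]
        simp

theorem pvLoops_eq (lines : List String) :
    pvALoop (PySem.List.enumerate lines) [] 1 = pvBLoop lines := by
  have hA := pvALoop_emit lines.length lines 0 le_rfl
  simp only [Nat.mul_zero, Nat.cast_zero, Nat.max_eq_right (by omega : 0 ≤ 1), Nat.cast_one] at hA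
  have hfun : (fun (res : List String) (start : Int) =>
      (if start ≠ 0 then
        res ++ ["[[page=" ++ PySem.Int.toStr (PySem.Int.floordiv start 50) ++ "]]"]
      else res)
      ++ PySem.List.slice lines (some start) (some (start + 50)))
      = (fun res start => res ++ pvBChunk lines start) := by
    funext res start
    unfold pvBChunk
    split_ifs <;> simp
  have hB := pvBLoop_emit lines.length lines 0 (by omega)
  simp only [Nat.mul_zero, Nat.cast_zero, List.drop_zero] at hB
  rw [pvBLoop, hfun, PySem.List.foldl_append_eq_flatMap, List.nil_append, hB, hA]

-- ===== VERDICT (by name: the statement is the Claim_ definition above) =====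
theorem add_heuristic_anchors_py_spec : Claim_equal_add_heuristic_anchors_py := by
  intro content _
  unfold Spec_add_heuristic_anchors_py add_heuristic_anchors_py add_heuristic_anchors_py_alt
  simp only [pvLoops_eq]
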